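-- pv_equiv track=rewrite | github.com/OzkanOzsahin/python-for | main.py | most_vowels
-- ===== SOURCE A (Python) =====
-- def most_vowels(countries):
--     vowels = "aeiou"
--     country_vowel_counts = {}
--     for country in countries:
--         vowel_count = sum(1 for c in country.lower() if c in vowels)
--         country_vowel_counts[country] = vowel_count
--     top_countries = sorted(country_vowel_counts, key=country_vowel_counts.get, reverse=True)[:3]
--     return top_countries
-- ===== SOURCE B (Python) =====
-- def most_vowels(countries):
--     vowels = "aeiou"
--     counts = {}
--     for country in countries:
--         counts[country] = sum(1 for c in country.lower() if c in vowels)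
--     result = []
--     for _ in range(3):
--         if not counts:
--             break
--         best = max(counts, key=counts.get)
--         result.append(best)
--         del counts[best]
--     return result
-- ===== Notes on version B (the rewrite author's own statement) =====
-- stated objective: alternative
-- what changed: Replaces the full stable reverse sort of the vowel-count dict by a selection loop that up to three times takes the first maximum (max over the insertion-ordered dict) and deletes it, reproducing stable reverse-sort tie-breaking without sorting.
import Mathlib
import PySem

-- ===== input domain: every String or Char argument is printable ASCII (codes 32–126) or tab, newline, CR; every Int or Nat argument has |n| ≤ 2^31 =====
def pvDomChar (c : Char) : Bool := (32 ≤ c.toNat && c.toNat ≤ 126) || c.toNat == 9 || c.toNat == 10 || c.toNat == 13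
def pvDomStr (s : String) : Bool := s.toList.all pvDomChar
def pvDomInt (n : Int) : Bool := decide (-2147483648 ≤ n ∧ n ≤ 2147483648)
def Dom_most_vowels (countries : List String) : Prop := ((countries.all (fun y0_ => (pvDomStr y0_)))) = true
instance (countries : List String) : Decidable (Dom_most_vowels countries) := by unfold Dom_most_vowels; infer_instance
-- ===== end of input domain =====

-- B replaces the full stable reverse sort of the vowel-count dict by a selection loop
-- (up to three times: first maximum over the insertion-ordered dict, delete it) — alternative decomposition, same results.

-- ===== PORT A =====
-- sum(1 for c in country.lower() if c in vowels), vowels = "aeiou"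
def mvCountA (country : String) : Int :=
  (((PySem.Str.lower country).toList.filter (fun c => decide (c ∈ "aeiou".toList))).map (fun _ => (1 : Int))).sum

def most_vowels (countries : List String) : List String :=
  let country_vowel_counts :=
    countries.foldl (fun d country => d.insert country (mvCountA country)) PySem.Dict.empty
  -- key=country_vowel_counts.get: every iterated key is present, so .get k = value = getD k 0
  PySem.List.slice
    (PySem.List.sorted country_vowel_counts.keys (fun k => country_vowel_counts.getD k 0) true)
    none (some 3)

-- ===== PORT B =====
-- same counting step as A (Source B's first loop)
def mvCountB (country : String) : Int :=
  (((PySem.Str.lower country).toList.filter (fun c => decide (c ∈ "aeiou".toList))).map (fun _ => (1 : Int))).sum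

-- for _ in range(3): if not counts: break; best = max(counts, key=counts.get); result.append(best); del counts[best]
def mvSelect (n : Nat) (counts : PySem.Dict String Int) (result : List String) : List String :=
  match n with
  | 0 => result
  | n + 1 =>
    if counts.items = [] then result
    else
      match PySem.List.max? counts.keys (fun k => counts.getD k 0) with
      | none => result   -- unreachable: counts is nonempty here
      | some best => mvSelect n (counts.erase best) (result ++ [best])

def most_vowels_alt (countries : List String) : List String :=
  let counts :=
    countries.foldl (fun d country => d.insert country (mvCountB country)) PySem.Dict.empty
  mvSelect 3 counts []

-- ===== PRECONDITION & SPEC =====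
def Spec_most_vowels (countries : List String) (out : List String) : Prop := out = most_vowels_alt countries
instance (countries : List String) (out : List String) : Decidable (Spec_most_vowels countries out) := by unfold Spec_most_vowels; infer_instance

-- ===== CLAIM (what is proved, stated in full; the proofs are below) =====
def Claim_equal_most_vowels : Prop := ∀ (countries : List String), Dom_most_vowels countries → Spec_most_vowels countries (most_vowels countries)

-- ===== LEMMAS AND PROOFS =====

-- one foldl step of max? past an appended element
lemma mv_max?_append_single (f : String → Int) (ys : List String) (y : String) :
    PySem.List.max? (ys ++ [y]) f =
      match PySem.List.max? ys f with
      | none => some y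
      | some m => if f m < f y then some y else some m := by
  unfold PySem.List.max?
  rw [List.foldl_append]
  generalize List.foldl _ none ys = o
  cases o <;> rfl

-- one foldl step of the insertion sort past an appended element
lemma mv_sorted_rev_append_single (f : String → Int) (ys : List String) (y : String) :
    PySem.List.sorted (ys ++ [y]) f true =
      PySem.List.insertBy (fun a b => decide (f b < f a)) y (PySem.List.sorted ys f true) := by
  rw [PySem.List.sorted_rev_eq_foldl_insertBy, PySem.List.sorted_rev_eq_foldl_insertBy,
    List.foldl_append]
  rfl

-- insertBy only compares the inserted element against list members
lemma mv_insertBy_congr (bef beg : String → String → Bool) (y : String) :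
    ∀ l : List String, (∀ z ∈ l, bef y z = beg y z) →
      PySem.List.insertBy bef y l = PySem.List.insertBy beg y l := by
  intro l
  induction l with
  | nil => intro _; rfl
  | cons z t ih =>
    intro h
    simp only [PySem.List.insertBy, h z (by simp)]
    by_cases hz : beg y z = true
    · simp [hz]
    · simp only [Bool.not_eq_true] at hz
      simp [hz, ih (fun w hw => h w (by simp [hw]))]

-- sorted depends only on the key's values on the list
lemma mv_sorted_rev_congr (f g : String → Int) :
    ∀ xs : List String, (∀ x ∈ xs, f x = g x) →
      PySem.List.sorted xs f true = PySem.List.sorted xs g true := by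
  intro xs
  induction xs using List.reverseRecOn with
  | nil => intro _; rfl
  | append_singleton ys y ih =>
    intro h
    rw [mv_sorted_rev_append_single, mv_sorted_rev_append_single,
      ih (fun x hx => h x (by simp [hx]))]
    apply mv_insertBy_congr
    intro z hz
    have hzys : z ∈ ys := (PySem.List.mem_sorted _ _ _ _).1 hz
    rw [h y (by simp), h z (by simp [hzys])]

-- selection characterises the head of the stable reverse sort
lemma mv_sel_sorted (f : String → Int) :
    ∀ (xs : List String) {m : String}, PySem.List.max? xs f = some m →
      PySem.List.sorted xs f true = m :: PySem.List.sorted (xs.erase m) f true := by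
  intro xs
  induction xs using List.reverseRecOn with
  | nil => intro m h; simp [PySem.List.max?] at h
  | append_singleton ys y ih =>
    intro m h
    rw [mv_max?_append_single] at h
    rw [mv_sorted_rev_append_single]
    cases hys : PySem.List.max? ys f with
    | none =>
      have hnil : ys = [] := (PySem.List.max?_eq_none_iff ys f).1 hys
      subst hnil
      rw [hys] at h
      cases h
      simp [PySem.List.sorted, PySem.List.insertBy, List.erase_cons_head]
    | some m' =>
      rw [hys] at h
      have h' : (if f m' < f y then some y else some m') = some m := h
      by_cases hlt : f m' < f y
      · rw [if_pos hlt] at h'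
        cases h'
        have hynotin : y ∉ ys := by
          intro hmem
          exact absurd (PySem.List.max?_isMax hys y hmem) (not_le.mpr hlt)
        rw [List.erase_append_right _ hynotin, List.erase_cons_head, List.append_nil]
        cases hs : PySem.List.sorted ys f true with
        | nil => simp [PySem.List.insertBy]
        | cons h0 t =>
          have h0ys : h0 ∈ ys := (PySem.List.mem_sorted _ _ _ _).1 (by rw [hs]; simp)
          have : f h0 < f y := lt_of_le_of_lt (PySem.List.max?_isMax hys h0 h0ys) hlt
          simp [PySem.List.insertBy, this]
      · rw [if_neg hlt] at h'
        cases h'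
        have hmem : m ∈ ys := PySem.List.max?_mem hys
        rw [List.erase_append_left _ hmem, mv_sorted_rev_append_single, ih hys]
        simp [PySem.List.insertBy, hlt]

-- find? over the items surviving `del d[k]` agrees for any other key
lemma mv_find?_filter_ne (k k' : String) (h : k' ≠ k) :
    ∀ l : List (String × Int),
      (l.filter (fun p => !(p.1 == k))).find? (fun p => p.1 == k') =
        l.find? (fun p => p.1 == k') := by
  intro l
  induction l with
  | nil => rfl
  | cons p t ih =>
    by_cases hk : p.1 = k
    · have hcond : (!(p.1 == k)) = false := by simp [hk]
      have h1 : (p.1 == k') = false := by rw [hk]; simp [Ne.symm h]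
      rw [List.filter_cons, hcond]
      simp only [Bool.false_eq_true, if_false]
      rw [ih, List.find?]
      simp [h1]
    · have hcond : (!(p.1 == k)) = true := by simp [hk]
      rw [List.filter_cons, hcond, if_pos rfl]
      cases hpk : (p.1 == k') <;> simp [List.find?, hpk, ih]

lemma mv_getD_erase_of_ne (d : PySem.Dict String Int) (k k' : String) (h : k' ≠ k) :
    (d.erase k).getD k' 0 = d.getD k' 0 := by
  simp [PySem.Dict.getD, PySem.Dict.get?, PySem.Dict.erase, mv_find?_filter_ne k k' h]

lemma mv_keys_erase (d : PySem.Dict String Int) (k : String) :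
    (d.erase k).keys = d.keys.filter (fun x => !(x == k)) := by
  simp [PySem.Dict.erase, PySem.Dict.keys, List.filter_map]
  rfl

lemma mv_keys_erase_nodup (d : PySem.Dict String Int) (k : String) (h : d.keys.Nodup) :
    (d.erase k).keys = d.keys.erase k := by
  rw [mv_keys_erase, List.Nodup.erase_eq_filter h]
  rfl

-- the selection loop produces exactly the first n entries of the stable reverse sort
lemma mv_sel_eq_take :
    ∀ (n : Nat) (d : PySem.Dict String Int) (acc : List String), d.keys.Nodup →
      mvSelect n d acc =
        acc ++ (PySem.List.sorted d.keys (fun k => d.getD k 0) true).take n := by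
  intro n
  induction n with
  | zero => intro d acc _; simp [mvSelect]
  | succ n ih =>
    intro d acc hnd
    by_cases hk : d.items = []
    · have hkeys : d.keys = [] := by simp [PySem.Dict.keys, hk]
      simp [mvSelect, hk, hkeys, PySem.List.sorted]
    · have hkeys : d.keys ≠ [] := by
        simp only [PySem.Dict.keys]
        exact fun hc => hk (List.map_eq_nil_iff.1 hc)
      cases hmax : PySem.List.max? d.keys (fun k => d.getD k 0) with
      | none => exact absurd ((PySem.List.max?_eq_none_iff _ _).1 hmax) hkeys
      | some best =>
        have hkeyseq : (d.erase best).keys = d.keys.erase best := mv_keys_erase_nodup d best hnd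
        have hnd' : (d.erase best).keys.Nodup := hkeyseq ▸ List.Nodup.erase best hnd
        have hstep : mvSelect (n + 1) d acc = mvSelect n (d.erase best) (acc ++ [best]) := by
          simp [mvSelect, hk, hmax]
        have hsor : PySem.List.sorted (d.keys.erase best) (fun k => (d.erase best).getD k 0) true
            = PySem.List.sorted (d.keys.erase best) (fun k => d.getD k 0) true := by
          apply mv_sorted_rev_congr
          intro x hx
          have hxne : x ≠ best := ((List.Nodup.mem_erase_iff hnd).1 hx).1
          exact mv_getD_erase_of_ne d best x hxne
        rw [hstep, ih (d.erase best) (acc ++ [best]) hnd', hkeyseq, hsor,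
          mv_sel_sorted _ _ hmax, List.take_succ_cons, List.append_assoc]
        rfl

-- the two counting steps are the same function
lemma mv_count_eq : mvCountA = mvCountB := rfl

-- the dict built by the counting loop has distinct keys
lemma mv_nodup_keys (countries : List String) :
    (countries.foldl (fun d country => d.insert country (mvCountA country)) PySem.Dict.empty).keys.Nodup := by
  exact PySem.Dict.nodup_keys_foldl_insert countries (fun _ c => mvCountA c) PySem.Dict.empty
    PySem.Dict.nodup_keys_empty

-- ===== VERDICT (by name: the statement is the Claim_ definition above) =====
theorem most_vowels_spec : Claim_equal_most_vowels := by
  intro countries _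
  show most_vowels countries = most_vowels_alt countries
  unfold most_vowels most_vowels_alt
  rw [← mv_count_eq]
  rw [mv_sel_eq_take 3 _ [] (mv_nodup_keys countries)]
  rw [PySem.List.slice_to _ (by norm_num)]
  rfl
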